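-- pv_equiv track=rewrite | github.com/sravan27/indian-alpha-terminal | scripts/synthesize_pitch_brain.py | _category_for_seed_tags
-- ===== SOURCE A (Python) =====
-- def _category_for_seed_tags(tags: list[str]) -> str:
--     """Map curated seed tags to canonical category names used elsewhere."""
--     pri = [
--         ("#D2C", "D2C"),
--         ("#Skincare", "Beauty"),
--         ("#Beauty", "Beauty"),
--         ("#BrandBuilding", "Brand Building"),
--         ("#Ecommerce", "E-commerce"),
--         ("#VC", "Capital"),
--         ("#Capital", "Capital"),
--         ("#Fundraising", "Capital"),
--         ("#Wealth", "Capital"),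
--         ("#AI", "AI"),
--         ("#Health", "Health"),
--         ("#Longevity", "Health"),
--         ("#Climate", "Climate"),
--         ("#EV", "EV"),
--         ("#Hospitality", "Hospitality"),
--         ("#Restaurants", "Hospitality"),
--         ("#CraftBeverages", "Hospitality"),
--         ("#Content", "Content"),
--         ("#SocialMedia", "Content"),
--         ("#Creators", "Creator Economy"),
--         ("#Influence", "Creator Economy"),
--         ("#Education", "Education"),
--         ("#EdTech", "Education"),
--         ("#Gaming", "Gaming"),
--         ("#FounderMode", "Founders"),
--         ("#MentalHealth", "Founders"),
--         ("#Entrepreneurship", "Founders"),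
--         ("#Acquisitions", "M&A"),
--         ("#RealEstate", "RealEstate"),
--         ("#Metaverse", "Metaverse"),
--         ("#Platforms", "Platforms"),
--     ]
--     for tag, cat in pri:
--         if tag in tags:
--             return cat
--     return "General"
-- ===== SOURCE B (Python) =====
-- _RANK = {
--     "#D2C": (0, "D2C"),
--     "#Skincare": (1, "Beauty"),
--     "#Beauty": (2, "Beauty"),
--     "#BrandBuilding": (3, "Brand Building"),
--     "#Ecommerce": (4, "E-commerce"),
--     "#VC": (5, "Capital"),
--     "#Capital": (6, "Capital"),
--     "#Fundraising": (7, "Capital"),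
--     "#Wealth": (8, "Capital"),
--     "#AI": (9, "AI"),
--     "#Health": (10, "Health"),
--     "#Longevity": (11, "Health"),
--     "#Climate": (12, "Climate"),
--     "#EV": (13, "EV"),
--     "#Hospitality": (14, "Hospitality"),
--     "#Restaurants": (15, "Hospitality"),
--     "#CraftBeverages": (16, "Hospitality"),
--     "#Content": (17, "Content"),
--     "#SocialMedia": (18, "Content"),
--     "#Creators": (19, "Creator Economy"),
--     "#Influence": (20, "Creator Economy"),
--     "#Education": (21, "Education"),
--     "#EdTech": (22, "Education"),
--     "#Gaming": (23, "Gaming"),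
--     "#FounderMode": (24, "Founders"),
--     "#MentalHealth": (25, "Founders"),
--     "#Entrepreneurship": (26, "Founders"),
--     "#Acquisitions": (27, "M&A"),
--     "#RealEstate": (28, "RealEstate"),
--     "#Metaverse": (29, "Metaverse"),
--     "#Platforms": (30, "Platforms"),
-- }
--
--
-- def _category_for_seed_tags(tags: list[str]) -> str:
--     """Map curated seed tags to canonical category names used elsewhere."""
--     best = None
--     for t in tags:
--         hit = _RANK.get(t)
--         if hit is not None and (best is None or hit[0] < best[0]):
--             best = hit
--     return best[1] if best is not None else "General"
-- ===== Notes on version B (the rewrite author's own statement) =====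
-- stated objective: faster
-- what changed: Inverts the traversal: instead of scanning the fixed 31-entry priority list and testing list membership in tags for each entry (A), B consults a precomputed tag -> (rank, category) dict literal and makes a single pass over tags keeping the lowest-rank recognized tag.
import Mathlib
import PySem

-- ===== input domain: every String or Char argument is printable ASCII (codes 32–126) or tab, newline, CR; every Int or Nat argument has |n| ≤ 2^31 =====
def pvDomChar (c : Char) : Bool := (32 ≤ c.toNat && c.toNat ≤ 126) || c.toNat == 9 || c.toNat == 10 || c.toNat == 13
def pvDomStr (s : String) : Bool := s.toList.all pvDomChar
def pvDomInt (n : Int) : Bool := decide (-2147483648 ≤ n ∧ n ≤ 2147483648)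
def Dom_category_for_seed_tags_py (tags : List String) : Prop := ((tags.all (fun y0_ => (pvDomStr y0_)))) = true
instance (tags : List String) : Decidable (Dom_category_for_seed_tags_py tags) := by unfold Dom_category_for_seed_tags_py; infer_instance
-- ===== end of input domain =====

-- B inverts the traversal: instead of scanning the fixed priority list and testing membership in
-- tags (A), it looks each input tag up in a precomputed tag → (rank, category) dict literal and
-- makes one pass over tags keeping the lowest-rank hit (objective: one pass over the input).

-- ===== PORT A =====
def pvPri : List (String × String) := [
  ("#D2C", "D2C"),
  ("#Skincare", "Beauty"),
  ("#Beauty", "Beauty"),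
  ("#BrandBuilding", "Brand Building"),
  ("#Ecommerce", "E-commerce"),
  ("#VC", "Capital"),
  ("#Capital", "Capital"),
  ("#Fundraising", "Capital"),
  ("#Wealth", "Capital"),
  ("#AI", "AI"),
  ("#Health", "Health"),
  ("#Longevity", "Health"),
  ("#Climate", "Climate"),
  ("#EV", "EV"),
  ("#Hospitality", "Hospitality"),
  ("#Restaurants", "Hospitality"),
  ("#CraftBeverages", "Hospitality"),
  ("#Content", "Content"),
  ("#SocialMedia", "Content"),
  ("#Creators", "Creator Economy"),
  ("#Influence", "Creator Economy"),
  ("#Education", "Education"),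
  ("#EdTech", "Education"),
  ("#Gaming", "Gaming"),
  ("#FounderMode", "Founders"),
  ("#MentalHealth", "Founders"),
  ("#Entrepreneurship", "Founders"),
  ("#Acquisitions", "M&A"),
  ("#RealEstate", "RealEstate"),
  ("#Metaverse", "Metaverse"),
  ("#Platforms", "Platforms")]

-- A's loop: 'for tag, cat in pri: if tag in tags: return cat' then 'return "General"'
def pvScanA (tags : List String) : List (String × String) → String
  | [] => "General"
  | (tag, cat) :: rest => if tags.contains tag then cat else pvScanA tags rest

def category_for_seed_tags_py (tags : List String) : String := pvScanA tags pvPri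

-- ===== PORT B =====
-- Source B's module-level dict literal _RANK: tag → (rank, category)
def pvRank : PySem.Dict String (Int × String) := PySem.Dict.ofList [
  ("#D2C", ((0 : Int), "D2C")),
  ("#Skincare", ((1 : Int), "Beauty")),
  ("#Beauty", ((2 : Int), "Beauty")),
  ("#BrandBuilding", ((3 : Int), "Brand Building")),
  ("#Ecommerce", ((4 : Int), "E-commerce")),
  ("#VC", ((5 : Int), "Capital")),
  ("#Capital", ((6 : Int), "Capital")),
  ("#Fundraising", ((7 : Int), "Capital")),
  ("#Wealth", ((8 : Int), "Capital")),
  ("#AI", ((9 : Int), "AI")),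
  ("#Health", ((10 : Int), "Health")),
  ("#Longevity", ((11 : Int), "Health")),
  ("#Climate", ((12 : Int), "Climate")),
  ("#EV", ((13 : Int), "EV")),
  ("#Hospitality", ((14 : Int), "Hospitality")),
  ("#Restaurants", ((15 : Int), "Hospitality")),
  ("#CraftBeverages", ((16 : Int), "Hospitality")),
  ("#Content", ((17 : Int), "Content")),
  ("#SocialMedia", ((18 : Int), "Content")),
  ("#Creators", ((19 : Int), "Creator Economy")),
  ("#Influence", ((20 : Int), "Creator Economy")),
  ("#Education", ((21 : Int), "Education")),
  ("#EdTech", ((22 : Int), "Education")),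
  ("#Gaming", ((23 : Int), "Gaming")),
  ("#FounderMode", ((24 : Int), "Founders")),
  ("#MentalHealth", ((25 : Int), "Founders")),
  ("#Entrepreneurship", ((26 : Int), "Founders")),
  ("#Acquisitions", ((27 : Int), "M&A")),
  ("#RealEstate", ((28 : Int), "RealEstate")),
  ("#Metaverse", ((29 : Int), "Metaverse")),
  ("#Platforms", ((30 : Int), "Platforms"))]

-- B's loop body: hit = _RANK.get(t); if hit is not None and (best is None or hit[0] < best[0]): best = hit
def pvStepB (d : PySem.Dict String (Int × String)) (best : Option (Int × String)) (t : String) :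
    Option (Int × String) :=
  match PySem.Dict.get? d t with
  | none => best
  | some hit =>
    match best with
    | none => some hit
    | some b => if hit.1 < b.1 then some hit else some b

def category_for_seed_tags_py_alt (tags : List String) : String :=
  match tags.foldl (pvStepB pvRank) none with
  | some b => b.2
  | none => "General"

-- ===== PRECONDITION & SPEC =====
def Spec_category_for_seed_tags_py (tags : List String) (out : String) : Prop := out = category_for_seed_tags_py_alt tags
instance (tags : List String) (out : String) : Decidable (Spec_category_for_seed_tags_py tags out) := by unfold Spec_category_for_seed_tags_py; infer_instance

-- ===== CLAIM (what is proved, stated in full; the proofs are below) =====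
def Claim_equal_category_for_seed_tags_py : Prop := ∀ (tags : List String), Dom_category_for_seed_tags_py tags → Spec_category_for_seed_tags_py tags (category_for_seed_tags_py tags)

-- ===== LEMMAS AND PROOFS =====

-- proof-side view of B's index: the assoc list of (tag, (rank, cat)) with ranks from k
def pvAssocIdx (k : Int) : List (String × String) → List (String × (Int × String))
  | [] => []
  | (t, c) :: L => (t, (k, c)) :: pvAssocIdx (k + 1) L

theorem pvRank_eq : pvRank = PySem.Dict.mk (pvAssocIdx 0 pvPri) := by decide

-- every rank stored in pvAssocIdx k L is ≥ k
theorem pv_lb (L : List (String × String)) (k : Int) (t : String) (p : Int × String)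
    (h : (PySem.Dict.mk (pvAssocIdx k L)).get? t = some p) : k ≤ p.1 := by
  induction L generalizing k with
  | nil => simp [pvAssocIdx, PySem.Dict.get?] at h
  | cons hd tl ih =>
    obtain ⟨a, c⟩ := hd
    rw [pvAssocIdx, PySem.Dict.get?_mk_cons] at h
    by_cases hac : a = t
    · simp [hac] at h
      simp [← h]
    · simp [hac] at h
      have := ih (k + 1) h
      omega

-- tags containing no occurrence of the head key fold the same over the tail index
theorem pv_skip (t : String) (p : Int × String) (rest : List (String × (Int × String)))
    (tags : List String) (b : Option (Int × String)) (h : ∀ s ∈ tags, s ≠ t) :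
    tags.foldl (pvStepB (PySem.Dict.mk ((t, p) :: rest))) b
      = tags.foldl (pvStepB (PySem.Dict.mk rest)) b := by
  induction tags generalizing b with
  | nil => rfl
  | cons s ts ih =>
    have hst : s ≠ t := h s (by simp)
    have hb : pvStepB (PySem.Dict.mk ((t, p) :: rest)) b s = pvStepB (PySem.Dict.mk rest) b s := by
      unfold pvStepB
      rw [PySem.Dict.get?_mk_cons]
      have hts : t ≠ s := Ne.symm hst
      simp [hts]
    simp only [List.foldl_cons, hb]
    exact ih _ (fun x hx => h x (by simp [hx]))

-- once best holds the minimal rank k, a fold over any tags whose hits all have rank ≥ k keeps it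
theorem pv_keep (d : PySem.Dict String (Int × String)) (k : Int) (c : String)
    (hd : ∀ s p, d.get? s = some p → k ≤ p.1) (tags : List String) :
    tags.foldl (pvStepB d) (some (k, c)) = some (k, c) := by
  induction tags with
  | nil => rfl
  | cons s ts ih =>
    have : pvStepB d (some (k, c)) s = some (k, c) := by
      unfold pvStepB
      cases hg : d.get? s with
      | none => rfl
      | some hit =>
        have := hd s hit hg
        simp; omega
    simp only [List.foldl_cons, this, ih]

-- if t occurs in tags, the fold over the index headed by (t, (k, c)) ends at exactly (k, c)
theorem pv_reach (t : String) (k : Int) (c : String) (rest : List (String × (Int × String)))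
    (hrest : ∀ s p, (PySem.Dict.mk rest).get? s = some p → k + 1 ≤ p.1)
    (tags : List String) (b : Option (Int × String))
    (hb : b = none ∨ ∃ p, b = some p ∧ k ≤ p.1 ∧ (p.1 = k → p = (k, c)))
    (ht : t ∈ tags) :
    tags.foldl (pvStepB (PySem.Dict.mk ((t, (k, c)) :: rest))) b = some (k, c) := by
  induction tags generalizing b with
  | nil => simp at ht
  | cons s ts ih =>
    -- property of every lookup in the full index
    have hidx : ∀ s' p, (PySem.Dict.mk ((t, (k, c)) :: rest)).get? s' = some p →
        k ≤ p.1 ∧ (p.1 = k → p = (k, c)) := by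
      intro s' p hg
      rw [PySem.Dict.get?_mk_cons] at hg
      by_cases hts : t = s'
      · simp [hts] at hg; simp [← hg]
      · simp [hts] at hg
        have := hrest s' p hg
        constructor
        · omega
        · intro hk; omega
    by_cases hts : t ∈ ts
    · -- the invariant is preserved by one step
      have hb' : pvStepB (PySem.Dict.mk ((t, (k, c)) :: rest)) b s = none ∨
          ∃ p, pvStepB (PySem.Dict.mk ((t, (k, c)) :: rest)) b s = some p ∧ k ≤ p.1 ∧
            (p.1 = k → p = (k, c)) := by
        unfold pvStepB
        cases hg : (PySem.Dict.mk ((t, (k, c)) :: rest)).get? s with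
        | none => exact hb
        | some hit =>
          have hhit := hidx s hit hg
          rcases hb with hb | ⟨p, hbp, hp1, hp2⟩
          · subst hb; exact Or.inr ⟨hit, rfl, hhit⟩
          · subst hbp
            by_cases hlt : hit.1 < p.1
            · simp [hlt]; exact ⟨hhit.1, hhit.2⟩
            · simp [hlt]; exact ⟨hp1, hp2⟩
      simp only [List.foldl_cons]
      exact ih _ hb' hts
    · -- then s = t: the head hit is taken and kept
      have hst : s = t := by
        rcases List.mem_cons.mp ht with h | h
        · exact h.symm
        · exact absurd h hts
      subst hst
      have hget : (PySem.Dict.mk ((s, (k, c)) :: rest)).get? s = some (k, c) := by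
        rw [PySem.Dict.get?_mk_cons]; simp
      have hstep : pvStepB (PySem.Dict.mk ((s, (k, c)) :: rest)) b s = some (k, c) := by
        unfold pvStepB
        rw [hget]
        rcases hb with hb | ⟨p, hbp, hp1, hp2⟩
        · simp [hb]
        · subst hbp
          by_cases hlt : k < p.1
          · simp [hlt]
          · have hpk : p.1 = k := by omega
            simp [hp2 hpk]
      simp only [List.foldl_cons, hstep]
      exact pv_keep _ k c (fun s' p hg => (hidx s' p hg).1) ts

-- main: A's scan of L equals B's fold over tags against the index of L at any rank offset
theorem pv_main (L : List (String × String)) (k : Int) (tags : List String) :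
    pvScanA tags L =
      (match tags.foldl (pvStepB (PySem.Dict.mk (pvAssocIdx k L))) none with
       | some b => b.2
       | none => "General") := by
  induction L generalizing k with
  | nil =>
    have : ∀ b : Option (Int × String),
        tags.foldl (pvStepB (PySem.Dict.mk (pvAssocIdx k []))) b = b := by
      intro b
      induction tags generalizing b with
      | nil => rfl
      | cons s ts ih =>
        have : pvStepB (PySem.Dict.mk (pvAssocIdx k [])) b s = b := by
          unfold pvStepB; simp [pvAssocIdx, PySem.Dict.get?]
        simp only [List.foldl_cons, this, ih]
    simp [pvScanA, this]
  | cons hd tl ih =>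
    obtain ⟨t, c⟩ := hd
    rw [pvAssocIdx]
    by_cases h : tags.contains t
    · have ht : t ∈ tags := by simpa using h
      rw [pv_reach t k c (pvAssocIdx (k + 1) tl)
        (fun s p hg => pv_lb tl (k + 1) s p hg) tags none (Or.inl rfl) ht]
      simp only [pvScanA, if_pos h]
    · have hne : ∀ s ∈ tags, s ≠ t := by
        intro s hs he
        exact h (by simpa [he] using List.elem_iff.mpr hs)
      rw [pv_skip t (k, c) (pvAssocIdx (k + 1) tl) tags none hne]
      simp only [pvScanA, if_neg h]
      exact ih (k + 1)

-- ===== VERDICT (by name: the statement is the Claim_ definition above) =====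
theorem category_for_seed_tags_py_spec : Claim_equal_category_for_seed_tags_py := by
  intro tags _
  unfold Spec_category_for_seed_tags_py category_for_seed_tags_py category_for_seed_tags_py_alt
  rw [pvRank_eq]
  exact pv_main pvPri 0 tags
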